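-- pv_equiv track=rewrite | github.com/SamuilDichev/UoM-MSc-Advanced-Computer-Science | COMP61511 Software Engineering Concepts in Practice/week3/wc.py | preprocessArgs
-- ===== SOURCE A (Python) =====
-- def preprocessArgs(args):
--   flags, files = [], []
--   onlyFilesLeft = False
--   for arg in args:
--     if str(arg) == "--":
--       onlyFilesLeft = True
--
--     if not onlyFilesLeft and not isFileArg(arg):
--       flags.append(arg)
--     elif onlyFilesLeft or isFileArg(arg):
--       files.append(arg)
--
--   return flags + files
--
-- def isFileArg(arg):
--   return not str(arg).startswith("-") or str(arg) == "-" or str(arg) == "--"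
-- ===== SOURCE B (Python) =====
-- def isFileArg(arg):
--   return not str(arg).startswith("-") or str(arg) == "-" or str(arg) == "--"
--
-- def preprocessArgs(args):
--   args = list(args)
--   try:
--     split = args.index("--")
--   except ValueError:
--     split = len(args)
--   head = args[:split]
--   flags = [a for a in head if not isFileArg(a)]
--   files = [a for a in head if isFileArg(a)] + args[split:]
--   return flags + files
-- ===== Notes on version B (the rewrite author's own statement) =====
-- stated objective: simpler
-- what changed: Replaces the latching onlyFilesLeft state machine with locate-the-first-'--'-then-partition: the list is split at the first '--' and the prefix is partitioned by isFileArg, the suffix appended wholesale to files.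
import Mathlib
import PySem

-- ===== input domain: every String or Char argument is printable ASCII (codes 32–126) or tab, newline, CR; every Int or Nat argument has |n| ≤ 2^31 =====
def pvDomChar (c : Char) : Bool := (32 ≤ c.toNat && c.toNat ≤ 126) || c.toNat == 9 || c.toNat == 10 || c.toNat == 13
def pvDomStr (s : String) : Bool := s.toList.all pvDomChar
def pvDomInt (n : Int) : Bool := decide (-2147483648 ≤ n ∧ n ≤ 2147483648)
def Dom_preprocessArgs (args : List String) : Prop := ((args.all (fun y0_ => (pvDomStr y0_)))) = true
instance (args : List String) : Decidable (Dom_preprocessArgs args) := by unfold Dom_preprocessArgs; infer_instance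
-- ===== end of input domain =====

-- B replaces A's latching onlyFilesLeft state machine by locating the first "--" and
-- partitioning the prefix by isFileArg; same O(n) cost, simpler decomposition.

-- ===== PORT A =====
def isFileArg (arg : String) : Bool :=
  !(PySem.Str.startswith arg "-") || arg == "-" || arg == "--"

def preprocessArgs (args : List String) : List String :=
  let st := args.foldl
    (fun (st : List String × List String × Bool) arg =>
      let flags := st.1
      let files := st.2.1
      let onlyFilesLeft := if arg == "--" then true else st.2.2
      if !onlyFilesLeft && !isFileArg arg then
        (flags ++ [arg], files, onlyFilesLeft)
      else if onlyFilesLeft || isFileArg arg then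
        (flags, files ++ [arg], onlyFilesLeft)
      else
        (flags, files, onlyFilesLeft))
    ([], [], false)
  st.1 ++ st.2.1

-- ===== PORT B =====
def isFileArg_alt (arg : String) : Bool :=
  !(PySem.Str.startswith arg "-") || arg == "-" || arg == "--"

def preprocessArgs_alt (args : List String) : List String :=
  let split : Nat := (PySem.List.index? args "--").getD args.length
  let head := PySem.List.slice args none (some (split : Int))
  let tail := PySem.List.slice args (some (split : Int)) none
  (head.filter (fun a => !isFileArg_alt a)) ++ ((head.filter isFileArg_alt) ++ tail)

-- ===== PRECONDITION & SPEC =====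
def Spec_preprocessArgs (args : List String) (out : List String) : Prop := out = preprocessArgs_alt args
instance (args : List String) (out : List String) : Decidable (Spec_preprocessArgs args out) := by unfold Spec_preprocessArgs; infer_instance

-- ===== CLAIM (what is proved, stated in full; the proofs are below) =====
def Claim_equal_preprocessArgs : Prop := ∀ (args : List String), Dom_preprocessArgs args → Spec_preprocessArgs args (preprocessArgs args)

-- ===== LEMMAS AND PROOFS =====

-- A's loop body, named for the lemmas.
def pvStep (st : List String × List String × Bool) (arg : String) : List String × List String × Bool :=
  let flags := st.1
  let files := st.2.1
  let onlyFilesLeft := if arg == "--" then true else st.2.2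
  if !onlyFilesLeft && !isFileArg arg then
    (flags ++ [arg], files, onlyFilesLeft)
  else if onlyFilesLeft || isFileArg arg then
    (flags, files ++ [arg], onlyFilesLeft)
  else
    (flags, files, onlyFilesLeft)

theorem preprocessArgs_eq_fold (args : List String) :
    preprocessArgs args =
      (args.foldl pvStep ([], [], false)).1 ++ (args.foldl pvStep ([], [], false)).2.1 := rfl

def pvSplit (args : List String) : Nat :=
  (PySem.List.index? args "--").getD args.length

theorem pvSplit_cons_self (rest : List String) : pvSplit ("--" :: rest) = 0 := by
  unfold pvSplit
  rw [PySem.List.index?_cons_self]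
  rfl

theorem pvSplit_cons_ne (a : String) (rest : List String) (h : a ≠ "--") :
    pvSplit (a :: rest) = pvSplit rest + 1 := by
  unfold pvSplit
  rw [PySem.List.index?_cons_of_ne rest h]
  cases PySem.List.index? rest "--" <;> simp

theorem isFileArg_sep : isFileArg "--" = true := by decide

-- once the '--' separator latched, everything remaining goes to files
theorem fold_true (args : List String) : ∀ flags files : List String,
    args.foldl pvStep (flags, files, true) = (flags, files ++ args, true) := by
  induction args with
  | nil => intro flags files; simp
  | cons a rest ih =>
    intro flags files
    simp only [List.foldl_cons, pvStep]
    split <;> simp_all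

-- before the separator: characterisation of A's loop by split-then-partition
theorem fold_false (args : List String) : ∀ flags files : List String,
    args.foldl pvStep (flags, files, false) =
      (flags ++ (args.take (pvSplit args)).filter (fun a => !isFileArg a),
       files ++ (args.take (pvSplit args)).filter isFileArg ++ args.drop (pvSplit args),
       decide ("--" ∈ args)) := by
  induction args with
  | nil => intro flags files; simp [pvSplit, PySem.List.index?]
  | cons a rest ih =>
    intro flags files
    by_cases ha : a = "--"
    · subst ha
      have hstep : pvStep (flags, files, false) "--" = (flags, files ++ ["--"], true) := by
        simp [pvStep, isFileArg_sep]
      rw [List.foldl_cons, hstep, fold_true]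
      simp [pvSplit_cons_self]
    · have hs := pvSplit_cons_ne a rest ha
      have hbe : (a == "--") = false := by simp [ha]
      by_cases hf : isFileArg a = true
      · have hstep : pvStep (flags, files, false) a = (flags, files ++ [a], false) := by
          simp [pvStep, hbe, hf]
        rw [List.foldl_cons, hstep, ih]
        simp [hs, hf, Ne.symm ha]
      · simp only [Bool.not_eq_true] at hf
        have hstep : pvStep (flags, files, false) a = (flags ++ [a], files, false) := by
          simp [pvStep, hbe, hf]
        rw [List.foldl_cons, hstep, ih]
        simp [hs, hf, Ne.symm ha]

theorem alt_closed (args : List String) :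
    preprocessArgs_alt args =
      (args.take (pvSplit args)).filter (fun a => !isFileArg a) ++
        ((args.take (pvSplit args)).filter isFileArg ++ args.drop (pvSplit args)) := by
  have h1 : PySem.List.slice args none (some ((pvSplit args : Nat) : Int)) =
      args.take (pvSplit args) := PySem.List.slice_to_natCast args (pvSplit args)
  have h2 : PySem.List.slice args (some ((pvSplit args : Nat) : Int)) none =
      args.drop (pvSplit args) := PySem.List.slice_from_natCast args (pvSplit args)
  have hfa : isFileArg_alt = isFileArg := rfl
  simp only [preprocessArgs_alt, pvSplit] at *
  rw [h1, h2, hfa]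

-- ===== VERDICT (by name: the statement is the Claim_ definition above) =====
theorem preprocessArgs_spec : Claim_equal_preprocessArgs := by
  intro args _
  show preprocessArgs args = preprocessArgs_alt args
  rw [preprocessArgs_eq_fold, fold_false args [] [], alt_closed]
  simp
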